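-- pv_equiv track=rewrite | github.com/VaHiX/CodeForces | Python/ByRound/1778/1778_C_Flexible_String.py | calc
-- ===== SOURCE A (Python) =====
-- def calc(a, b, pos):
--     # Calculate the number of matching pairs for substrings when some characters are replaced
--     an = 0
--     le = 0
--     for i in range(len(a)):
--         if a[i] == b[i] or (a[i] in pos):
--             le += 1
--         else:
--             le = 0
--         an += le
--     return an
-- ===== SOURCE B (Python) =====
-- def calc(a, b, pos):
--     # Two-phase: collect mismatch positions, then sum triangular numbers over
--     # the gaps between consecutive mismatch bounds.
--     n = len(a)
--     bad = [i for i in range(n) if a[i] != b[i] and a[i] not in pos]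
--     bounds = [-1] + bad + [n]
--     return sum((r - l - 1) * (r - l) // 2 for l, r in zip(bounds, bounds[1:]))
-- ===== Notes on version B (the rewrite author's own statement) =====
-- stated objective: alternative
-- what changed: B has no running-length accumulator at all: it first collects the list of mismatch positions, brackets it with -1 and len(a), and returns the sum of the closed-form triangular number (r-l-1)*(r-l)//2 over each pair of consecutive bounds, whereas A adds the current run length at every position of a single scan.
import Mathlib
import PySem

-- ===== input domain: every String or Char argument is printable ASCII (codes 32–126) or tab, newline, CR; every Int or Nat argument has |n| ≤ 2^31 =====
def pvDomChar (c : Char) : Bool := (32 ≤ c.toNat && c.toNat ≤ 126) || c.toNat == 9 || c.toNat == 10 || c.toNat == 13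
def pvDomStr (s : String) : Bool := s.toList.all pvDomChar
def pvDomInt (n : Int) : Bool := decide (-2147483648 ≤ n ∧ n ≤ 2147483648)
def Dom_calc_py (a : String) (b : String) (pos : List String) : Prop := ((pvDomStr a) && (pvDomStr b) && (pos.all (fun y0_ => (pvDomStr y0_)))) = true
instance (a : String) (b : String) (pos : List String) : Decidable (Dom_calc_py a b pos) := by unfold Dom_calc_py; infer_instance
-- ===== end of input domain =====

-- B drops A's per-position running-length accumulation entirely: it collects the mismatch
-- positions, brackets them with -1 and len(a), and sums one triangular number per gap
-- between consecutive bounds (same O(n), a different decomposition).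

-- ===== PORT A =====
-- a[i] always in range (i < len(a)); b[i] read with getD, exact under Pre_ (len a ≤ len b).
def calc_py (a : String) (b : String) (pos : List String) : Int :=
  let la := a.toList
  let lb := b.toList
  ((List.range la.length).foldl
    (fun (st : Int × Int) i =>
      let le := if la.getD i ' ' == lb.getD i ' ' || pos.contains (String.ofList [la.getD i ' ']) then st.2 + 1 else 0
      (st.1 + le, le))
    (0, 0)).1

-- ===== PORT B =====
-- bad = [i for i in range(n) if a[i] != b[i] and a[i] not in pos]; bounds = [-1]+bad+[n];
-- sum over zip(bounds, bounds[1:]). b[i] read with getD, exact under Pre_.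
def calc_py_alt (a : String) (b : String) (pos : List String) : Int :=
  let la := a.toList
  let lb := b.toList
  let n := la.length
  let bad := (List.range n).filter
    (fun i => !(la.getD i ' ' == lb.getD i ' ') && !(pos.contains (String.ofList [la.getD i ' '])))
  let bounds : List Int := (-1) :: bad.map (fun i => Int.ofNat i) ++ [(n : Int)]
  (bounds.zip bounds.tail).foldl
    (fun s p => s + PySem.Int.floordiv ((p.2 - p.1 - 1) * (p.2 - p.1)) 2) 0

-- ===== PRECONDITION & SPEC =====
-- Pre_ excludes exactly the inputs where both Pythons raise IndexError: b shorter than a.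
def Pre_calc_py (a : String) (b : String) (pos : List String) : Prop :=
  a.toList.length ≤ b.toList.length
instance (a : String) (b : String) (pos : List String) : Decidable (Pre_calc_py a b pos) := by unfold Pre_calc_py; infer_instance
def pvWitness_calc_py : String × String × List String := ("abc", "adc", ["b"])

def Spec_calc_py (a : String) (b : String) (pos : List String) (out : Int) : Prop := out = calc_py_alt a b pos
instance (a : String) (b : String) (pos : List String) (out : Int) : Decidable (Spec_calc_py a b pos out) := by unfold Spec_calc_py; infer_instance

-- ===== CLAIM =====
def Claim_equal_calc_py : Prop := ∀ (a : String) (b : String) (pos : List String), Dom_calc_py a b pos → Pre_calc_py a b pos → Spec_calc_py a b pos (calc_py a b pos)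

-- ===== LEMMAS AND PROOFS =====

-- triangular number n*(n+1)//2
def calcTri (n : Int) : Int := PySem.Int.floordiv (n * (n + 1)) 2

theorem calcTri_succ (n : Int) : calcTri (n + 1) = calcTri n + n + 1 := by
  obtain ⟨k, hk⟩ : ∃ k, n * (n + 1) = 2 * k := by
    rcases Int.even_mul_succ_self n with ⟨k, hk⟩
    exact ⟨k, by omega⟩
  have h1 : calcTri n = k := by simp [calcTri, hk]
  have h2 : calcTri (n + 1) = k + n + 1 := by
    have : (n + 1) * (n + 1 + 1) = 2 * (k + n + 1) := by nlinarith [hk]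
    simp [calcTri, this]
  omega

-- the per-position predicate, shared by the proof-side recursions
def calcPred (pos : List String) (p : Char × Char) : Bool :=
  p.1 == p.2 || pos.contains (String.ofList [p.1])

-- proof-side view of B: triangle of each gap between mismatches, run length carried as `le`
def calcBGo (pos : List String) : List (Char × Char) → Int → Int
  | [], le => calcTri le
  | p :: rest, le => if calcPred pos p then calcBGo pos rest (le + 1)
                     else calcTri le + calcBGo pos rest 0

-- mismatch indices starting at s
def calcBad (pos : List String) : Int → List (Char × Char) → List Int
  | _, [] => []
  | s, p :: rest => if calcPred pos p then calcBad pos (s + 1) rest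
                    else s :: calcBad pos (s + 1) rest

-- gap sum over a bounds list
def calcGs : List Int → Int
  | [] => 0
  | [_] => 0
  | l :: r :: t => PySem.Int.floordiv ((r - l - 1) * (r - l)) 2 + calcGs (r :: t)

-- invariant of A's fold: accumulator equals total minus the triangle of the open run
theorem calcFold_eq (pos : List String) : ∀ (l : List (Char × Char)) (an le : Int),
    (l.foldl
      (fun (st : Int × Int) (p : Char × Char) =>
        let le' := if calcPred pos p then st.2 + 1 else 0
        (st.1 + le', le'))
      (an, le)).1 = an - calcTri le + calcBGo pos l le := by
  intro l
  induction l with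
  | nil => intro an le; simp [calcBGo]
  | cons p rest ih =>
      intro an le
      rw [List.foldl_cons]
      by_cases h : calcPred pos p = true
      · simp only [calcBGo, h, if_true]
        rw [ih (an + (le + 1)) (le + 1)]
        have := calcTri_succ le
        omega
      · simp only [calcBGo, h, Bool.false_eq_true, if_false]
        rw [ih (an + 0) 0]
        have h0 : calcTri 0 = 0 := by decide
        omega

-- calcGs over a bracketed mismatch list equals calcBGo with the run length i - l - 1
theorem calcGs_eq (pos : List String) : ∀ (ps : List (Char × Char)) (i l : Int),
    calcGs (l :: calcBad pos i ps ++ [i + ps.length]) = calcBGo pos ps (i - l - 1) := by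
  intro ps
  induction ps with
  | nil =>
      intro i l
      simp only [calcBad, List.nil_append, List.length_nil, Int.natCast_zero, add_zero]
      show PySem.Int.floordiv ((i - l - 1) * (i - l)) 2 + calcGs [i] = calcTri (i - l - 1)
      have : (i - l - 1) * (i - l) = (i - l - 1) * ((i - l - 1) + 1) := by ring
      simp [calcGs, calcTri, this]
  | cons p rest ih =>
      intro i l
      by_cases h : calcPred pos p = true
      · simp only [calcBad, h, if_true, calcBGo]
        have hlen : i + ((p :: rest).length : Int) = (i + 1) + (rest.length : Int) := by
          simp; ring
        rw [hlen]
        have := ih (i + 1) l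
        have harg : i + 1 - l - 1 = i - l - 1 + 1 := by ring
        rw [harg] at this
        exact this
      · simp only [calcBad, h, Bool.false_eq_true, if_false, calcBGo]
        have hlen : i + ((p :: rest).length : Int) = (i + 1) + (rest.length : Int) := by
          simp; ring
        show PySem.Int.floordiv ((i - l - 1) * (i - l)) 2 +
            calcGs (i :: calcBad pos (i + 1) rest ++ [i + ((p :: rest).length : Int)]) = _
        rw [hlen]
        have := ih (i + 1) i
        simp only [add_sub_cancel_left] at this
        norm_num at this
        rw [List.cons_append, this]
        have : (i - l - 1) * (i - l) = (i - l - 1) * ((i - l - 1) + 1) := by ring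
        simp [calcTri, this]

-- the zip-with-tail fold of B's port is calcGs
theorem calcZip_eq : ∀ (xs : List Int) (s : Int),
    (xs.zip xs.tail).foldl
      (fun s p => s + PySem.Int.floordiv ((p.2 - p.1 - 1) * (p.2 - p.1)) 2) s
      = s + calcGs xs := by
  intro xs
  induction xs with
  | nil => intro s; simp [calcGs]
  | cons x t ih =>
      intro s
      cases t with
      | nil => simp [calcGs]
      | cons r t' =>
          show ((x, r) :: (r :: t').zip (r :: t').tail).foldl _ s = _
          rw [List.foldl_cons, ih]
          simp only [calcGs]
          ring

-- the filtered range of B's port is calcBad (indices shifted by s)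
theorem calcFilter_eq (pos : List String) (q : Nat → Bool) :
    ∀ (l : List (Char × Char)) (s : Nat),
    (∀ j (h : j < l.length), q (s + j) = !calcPred pos l[j]) →
    ((List.range' s l.length).filter q).map (fun i => Int.ofNat i) = calcBad pos (s : Int) l := by
  intro l
  induction l with
  | nil => intro s _; simp [calcBad]
  | cons p rest ih =>
      intro s hq
      have hr : List.range' s (p :: rest).length = s :: List.range' (s + 1) rest.length := by
        simp [List.range'_succ]
      rw [hr, List.filter_cons]
      have h0 : q s = !calcPred pos p := by simpa using hq 0 (by simp)
      have hrec := ih (s + 1) (fun j h => by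
        have := hq (j + 1) (by simpa using Nat.succ_lt_succ h)
        simpa [Nat.add_assoc, Nat.add_comm 1 j] using this)
      push_cast at hrec
      by_cases h : calcPred pos p = true
      · simp only [calcBad, h, if_true, h0, Bool.not_true, Bool.false_eq_true, if_false]
        rw [hrec]
      · have h' : calcPred pos p = false := by simpa using h
        simp only [calcBad, h', Bool.false_eq_true, if_false, h0, Bool.not_false, if_true]
        rw [List.map_cons, hrec]
        norm_num

-- fold over range-with-getD equals fold over the list itself
theorem calcFoldRange {α σ : Type} (l : List α) (d : α) (f : σ → α → σ) :
    ∀ (s : σ), (List.range l.length).foldl (fun s i => f s (l.getD i d)) s = l.foldl f s := by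
  induction l with
  | nil => intro s; simp
  | cons x rest ih =>
      intro s
      simp only [List.length_cons, List.range_succ_eq_map, List.foldl_cons, List.foldl_map,
        List.getD_cons_zero, List.getD_cons_succ]
      exact ih (f s x)

-- under Pre_, per-index reads coincide with components of the zipped list
theorem calcGetDZip (la lb : List Char) (h : la.length ≤ lb.length) (i : Nat) (hi : i < la.length) :
    (la.zip lb).getD i (' ', ' ') = (la.getD i ' ', lb.getD i ' ') := by
  have hz : i < (la.zip lb).length := by simp [List.length_zip]; omega
  have hb : i < lb.length := by omega
  rw [List.getD_eq_getElem _ _ hz, List.getD_eq_getElem _ _ hi, List.getD_eq_getElem _ _ hb]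
  simp [List.getElem_zip]

-- ===== VERDICT =====
theorem calc_py_spec : Claim_equal_calc_py := by
  intro a b pos _ hpre
  unfold Pre_calc_py at hpre
  unfold Spec_calc_py
  simp only [calc_py, calc_py_alt]
  set la := a.toList with hla
  set lb := b.toList with hlb
  set ps := la.zip lb with hps
  have hlen : la.length = ps.length := by simp [hps, List.length_zip]; omega
  -- A side: rewrite A's fold over indices as a fold over the zipped pair list
  have hcong : (List.range la.length).foldl
      (fun (st : Int × Int) i =>
        let le := if la.getD i ' ' == lb.getD i ' ' || pos.contains (String.ofList [la.getD i ' ']) then st.2 + 1 else 0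
        (st.1 + le, le)) ((0 : Int), (0 : Int))
      = (List.range ps.length).foldl
      (fun (st : Int × Int) i =>
        let p := ps.getD i (' ', ' ')
        let le := if calcPred pos p then st.2 + 1 else 0
        (st.1 + le, le)) ((0 : Int), (0 : Int)) := by
    rw [← hlen]
    refine PySem.List.foldl_congr_mem _ _ _ _ (fun st i hi => ?_)
    have hi' : i < la.length := by simpa using List.mem_range.mp hi
    simp only [hps, calcGetDZip la lb hpre i hi', calcPred]
  rw [hcong, calcFoldRange ps (' ', ' ')
      (fun (st : Int × Int) (p : Char × Char) =>
        let le := if calcPred pos p then st.2 + 1 else 0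
        (st.1 + le, le)) ((0:Int), (0:Int))]
  have hA := calcFold_eq pos ps 0 0
  simp only at hA
  rw [hA]
  -- B side
  have hfil : ((List.range la.length).filter
      (fun i => !(la.getD i ' ' == lb.getD i ' ') && !(pos.contains (String.ofList [la.getD i ' '])))).map
      (fun i => Int.ofNat i) = calcBad pos 0 ps := by
    rw [hlen, List.range_eq_range']
    have := calcFilter_eq pos
      (fun i => !(la.getD i ' ' == lb.getD i ' ') && !(pos.contains (String.ofList [la.getD i ' '])))
      ps 0 (fun j hj => by
        have hj' : j < la.length := by omega
        have hjb : j < lb.length := by omega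
        have hpj : ps[j] = (la[j], lb[j]) := by simp [hps, List.getElem_zip]
        have h1 : la.getD j ' ' = la[j] := List.getD_eq_getElem _ _ hj'
        have h2 : lb.getD j ' ' = lb[j] := List.getD_eq_getElem _ _ hjb
        simp only [Nat.zero_add, hpj, calcPred, h1, h2, Bool.not_or])
    simpa using this
  rw [hfil]
  rw [calcZip_eq ((-1) :: calcBad pos 0 ps ++ [(la.length : Int)]) 0]
  have hend : (la.length : Int) = 0 + (ps.length : Int) := by rw [hlen]; ring
  rw [hend]
  have := calcGs_eq pos ps 0 (-1)
  simp only [show (0 : Int) - (-1) - 1 = 0 by ring] at this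
  rw [show ((-1 : Int) :: calcBad pos 0 ps ++ [0 + (ps.length : Int)]) = ((-1 : Int) :: (calcBad pos 0 ps ++ [0 + (ps.length : Int)])) from rfl] at *
  rw [this]
  have h0 : calcTri 0 = 0 := by decide
  rw [h0]
  ring
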